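-- pv_equiv track=rewrite | github.com/JuliaDescamps/JDL | jdl.py | tiret_milieu
-- ===== SOURCE A (Python) =====
-- def tiret_milieu(v):
--     res = []
--     for i in range(len(v)) :
--         for j in range(i + 1, len(v)):
--             if v[i] == "-" and v[j] == "-":
--                 res.append(v[i:j+1])
--                 res.append(v[i:j+1])
--     return(res)
-- ===== SOURCE B (Python) =====
-- def tiret_milieu(v):
--     acc = []    # one growing char buffer per dash seen so far, in order of the dash
--     outs = []   # outs[t]: the doubled slices that start at dash t
--     for c in v:
--         for buf in acc:
--             buf.append(c)
--         if c == "-":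
--             for buf, o in zip(acc, outs):
--                 s = "".join(buf)
--                 o.append(s)
--                 o.append(s)
--             acc.append(["-"])
--             outs.append([])
--     res = []
--     for o in outs:
--         res.extend(o)
--     return res
-- ===== Notes on version B (the rewrite author's own statement) =====
-- stated objective: faster
-- what changed: B replaces the nested scan over all index pairs (slicing v for each dash pair) by a single left-to-right sweep that keeps one growing character buffer per dash seen so far, appends each character to all open buffers, emits the joined buffer twice into a per-start bucket at every new dash, and concatenates the buckets at the end.
import Mathlib
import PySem

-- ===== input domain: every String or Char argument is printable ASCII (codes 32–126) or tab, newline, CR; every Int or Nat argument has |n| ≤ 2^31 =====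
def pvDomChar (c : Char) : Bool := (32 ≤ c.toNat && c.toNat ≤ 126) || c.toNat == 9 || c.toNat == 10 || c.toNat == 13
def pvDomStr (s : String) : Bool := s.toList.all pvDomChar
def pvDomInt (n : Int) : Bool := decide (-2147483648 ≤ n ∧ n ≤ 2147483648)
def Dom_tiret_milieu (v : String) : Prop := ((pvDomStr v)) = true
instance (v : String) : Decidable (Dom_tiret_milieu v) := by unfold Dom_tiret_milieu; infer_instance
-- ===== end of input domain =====

-- B replaces the all-pairs slicing scan by a single sweep keeping one growing buffer per
-- dash seen so far, emitting into per-start buckets (objective: faster).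


-- ===== PORT A =====
def tiret_milieu (v : String) : List String :=
  (PySem.List.pyRange 0 (PySem.Str.len v)).foldl (fun res i =>
    (PySem.List.pyRange (i + 1) (PySem.Str.len v)).foldl (fun res j =>
      if PySem.Str.pyGet? v i = some '-' ∧ PySem.Str.pyGet? v j = some '-' then
        res ++ [PySem.Str.slice v (some i) (some (j + 1)),
                PySem.Str.slice v (some i) (some (j + 1))]
      else res) res) []

-- ===== PORT B =====
-- one sweep over the characters; state = (open buffers, one output bucket per dash seen)
def tiret_milieu_alt (v : String) : List String :=
  let st := v.toList.foldl (fun (st : List (List Char) × List (List String)) c =>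
    let acc := st.1.map (fun buf => buf ++ [c])
    if c = '-' then
      (acc ++ [['-']],
       (List.zipWith (fun buf o => o ++ [String.ofList buf, String.ofList buf]) acc st.2) ++ [[]])
    else
      (acc, st.2)) ([], [])
  st.2.foldl (fun res o => res ++ o) []

-- ===== PRECONDITION & SPEC =====
def Spec_tiret_milieu (v : String) (out : List String) : Prop := out = tiret_milieu_alt v
instance (v : String) (out : List String) : Decidable (Spec_tiret_milieu v out) := by unfold Spec_tiret_milieu; infer_instance

-- ===== CLAIM (what is proved, stated in full; the proofs are below) =====
def Claim_equal_tiret_milieu : Prop := ∀ (v : String), Dom_tiret_milieu v → Spec_tiret_milieu v (tiret_milieu v)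

-- ===== LEMMAS AND PROOFS =====

-- the one-pair loop body of port A (append the slice twice)
def pvApp (v : String) (i : Int) : List String → Int → List String :=
  fun res j => res ++ [PySem.Str.slice v (some i) (some (j + 1)),
                       PySem.Str.slice v (some i) (some (j + 1))]

-- "position i holds a dash"
def pvDash (v : String) : Int → Bool := fun i => PySem.Str.pyGet? v i == some '-'

-- dash positions of a character list, as naturals
def pvDn (p : List Char) : List Nat := (List.range p.length).filter (fun i => p.getD i ' ' == '-')

-- the slice from position i to position j inclusive
def pvSl (p : List Char) (i j : Nat) : String := String.ofList ((p.drop i).take (j + 1 - i))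

-- the doubled slices starting at dash i
def pvOut (p : List Char) (i : Nat) : List String :=
  ((pvDn p).filter (fun j => i < j)).flatMap (fun j => [pvSl p i j, pvSl p i j])

lemma pvRange_filter_gt (n i : Int) (h0 : 0 ≤ i) :
    (PySem.List.pyRange 0 n).filter (fun j => decide (i < j)) = PySem.List.pyRange (i + 1) n := by
  by_cases hn : i + 1 ≤ n
  · rw [PySem.List.pyRange_one_append 0 (i + 1) n (by omega) hn, List.filter_append]
    have h1 : (PySem.List.pyRange 0 (i + 1)).filter (fun j => decide (i < j)) = [] := by
      refine List.filter_eq_nil_iff.mpr ?_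
      intro a ha
      rw [PySem.List.mem_pyRange_one] at ha
      simp; omega
    have h2 : (PySem.List.pyRange (i + 1) n).filter (fun j => decide (i < j))
        = PySem.List.pyRange (i + 1) n := by
      refine List.filter_eq_self.mpr ?_
      intro a ha
      rw [PySem.List.mem_pyRange_one] at ha
      simp; omega
    rw [h1, h2, List.nil_append]
  · have hne : (PySem.List.pyRange 0 n).filter (fun j => decide (i < j)) = [] := by
      refine List.filter_eq_nil_iff.mpr ?_
      intro a ha
      rw [PySem.List.mem_pyRange_one] at ha
      simp; omega
    rw [hne, PySem.List.pyRange_one_eq_nil (by omega)]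

lemma pvA_eq (v : String) :
    tiret_milieu v
      = ((PySem.List.pyRange 0 (PySem.Str.len v)).filter (pvDash v)).foldl
          (fun res i => ((PySem.List.pyRange (i + 1) (PySem.Str.len v)).filter (pvDash v)).foldl
            (pvApp v i) res) [] := by
  unfold tiret_milieu
  rw [List.foldl_filter]
  apply PySem.List.foldl_congr_mem
  intro acc i _
  by_cases h : pvDash v i = true
  · rw [if_pos h, List.foldl_filter]
    apply PySem.List.foldl_congr_mem
    intro acc' j _
    have hi : PySem.Str.pyGet? v i = some '-' := by simpa [pvDash] using h
    by_cases hj : pvDash v j = true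
    · have hj' : PySem.Str.pyGet? v j = some '-' := by simpa [pvDash] using hj
      rw [if_pos ⟨hi, hj'⟩, if_pos hj]
      rfl
    · have hj' : ¬ PySem.Str.pyGet? v j = some '-' := by simpa [pvDash] using hj
      rw [if_neg (by tauto), if_neg hj]
  · rw [if_neg h]
    have hi : ¬ PySem.Str.pyGet? v i = some '-' := by simpa [pvDash] using h
    rw [PySem.List.foldl_congr_mem _ _ (fun a _ => a) acc (by intro a x _; rw [if_neg (by tauto)])]
    exact List.foldl_fixed _

-- A as a flatMap over dash-position pairs (Int side)
lemma pvA_flatMap (v : String) :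
    tiret_milieu v
      = ((PySem.List.pyRange 0 (PySem.Str.len v)).filter (pvDash v)).flatMap (fun i =>
          (((PySem.List.pyRange 0 (PySem.Str.len v)).filter (pvDash v)).filter
              (fun j => decide (i < j))).flatMap (fun j =>
            [PySem.Str.slice v (some i) (some (j + 1)),
             PySem.Str.slice v (some i) (some (j + 1))])) := by
  rw [pvA_eq]
  rw [PySem.List.foldl_congr_mem
        (g := fun res i =>
          res ++ ((((PySem.List.pyRange 0 (PySem.Str.len v)).filter (pvDash v)).filter
              (fun j => decide (i < j))).flatMap (fun j =>
            [PySem.Str.slice v (some i) (some (j + 1)),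
             PySem.Str.slice v (some i) (some (j + 1))])))
        (init := []) _ _ ?_]
  · rw [PySem.List.foldl_append_eq_flatMap, List.nil_append]
  · intro res i hi
    have h0 : 0 ≤ i := by
      rw [List.mem_filter, PySem.List.mem_pyRange_one] at hi
      exact hi.1.1
    have hfil : ((PySem.List.pyRange 0 (PySem.Str.len v)).filter (pvDash v)).filter
        (fun j => decide (i < j))
        = (PySem.List.pyRange (i + 1) (PySem.Str.len v)).filter (pvDash v) := by
      rw [List.filter_filter, ← pvRange_filter_gt (PySem.Str.len v) i h0, List.filter_filter]
      apply List.filter_congr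
      intro a _
      exact Bool.and_comm _ _
    simp only [hfil]
    exact PySem.List.foldl_append_eq_flatMap _ _ _

-- the dash positions on the Int side are the casts of pvDn
lemma pvDints_eq (v : String) :
    (PySem.List.pyRange 0 (PySem.Str.len v)).filter (pvDash v)
      = (pvDn v.toList).map (fun i => (i : Int)) := by
  unfold pvDn
  rw [PySem.Str.len_eq, PySem.List.pyRange_zero_natCast, List.filter_map]
  have h : (List.range v.toList.length).filter (pvDash v ∘ fun k : Nat => (k : Int))
      = (List.range v.toList.length).filter (fun i => v.toList.getD i ' ' == '-') := by
    apply List.filter_congr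
    intro i hi
    rw [List.mem_range] at hi
    have hg : PySem.Str.pyGet? v (i : Int) = some (v.toList.getD i ' ') := by
      rw [PySem.Str.pyGet?_natCast, List.getD_eq_getElem?_getD,
          List.getElem?_eq_getElem hi]
      rfl
    simp [Function.comp, pvDash, List.getElem?_eq_getElem hi]
  rw [h]
  simp
  exact List.map_eq_flatMap

-- slice bridge
lemma pvSlice_eq (v : String) (i j : Nat) :
    PySem.Str.slice v (some (i : Int)) (some ((j : Int) + 1)) = pvSl v.toList i j := by
  apply String.toList_inj.mp
  rw [PySem.Str.toList_slice, PySem.Chars.slice_eq_listSlice]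
  have hc : ((j : Int) + 1) = ((j + 1 : Nat) : Int) := by push_cast; ring
  rw [hc, PySem.List.slice_natCast]
  unfold pvSl
  rw [String.toList_ofList]

-- membership in pvDn
lemma pvDn_mem {p : List Char} {i : Nat} (h : i ∈ pvDn p) : i < p.length ∧ p.getD i ' ' = '-' := by
  unfold pvDn at h
  rw [List.mem_filter, List.mem_range] at h
  simpa using h

lemma pvDn_snoc (p : List Char) (c : Char) :
    pvDn (p ++ [c]) = pvDn p ++ (if c = '-' then [p.length] else []) := by
  unfold pvDn
  rw [List.length_append, List.length_singleton, List.range_succ, List.filter_append]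
  congr 1
  · apply List.filter_congr
    intro i hi
    rw [List.mem_range] at hi
    rw [List.getD_append _ _ _ _ hi]
  · by_cases hc : c = '-'
    · simp [hc]
    · simp [hc]

lemma pvSl_snoc (p : List Char) (c : Char) {i j : Nat} (hi : i ≤ p.length) (hj : j < p.length) :
    pvSl (p ++ [c]) i j = pvSl p i j := by
  unfold pvSl
  rw [List.drop_append_of_le_length hi,
      List.take_append_of_le_length (by rw [List.length_drop]; omega)]

-- appending a non-dash character changes no bucket
lemma pvOut_snoc_ne (p : List Char) (c : Char) (hc : ¬ c = '-') (i : Nat) (hi : i ≤ p.length) :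
    pvOut (p ++ [c]) i = pvOut p i := by
  unfold pvOut
  rw [pvDn_snoc, if_neg hc, List.append_nil]
  apply List.flatMap_congr
  intro j hj
  rw [List.mem_filter] at hj
  rw [pvSl_snoc p c hi (pvDn_mem hj.1).1]

-- appending a dash extends bucket i by the doubled full suffix slice
lemma pvOut_snoc_dash (p : List Char) (i : Nat) (hi : i ∈ pvDn p) :
    pvOut (p ++ ['-']) i
      = pvOut p i ++ [String.ofList ((p ++ ['-']).drop i), String.ofList ((p ++ ['-']).drop i)] := by
  have hilt : i < p.length := (pvDn_mem hi).1
  unfold pvOut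
  rw [pvDn_snoc, if_pos rfl, List.filter_append, List.flatMap_append]
  congr 1
  · apply List.flatMap_congr
    intro j hj
    rw [List.mem_filter] at hj
    rw [pvSl_snoc p '-' (le_of_lt hilt) (pvDn_mem hj.1).1]
  · have hfil : List.filter (fun j => decide (i < j)) [p.length] = [p.length] := by
      simp [hilt]
    rw [hfil]
    have hsl : pvSl (p ++ ['-']) i p.length = String.ofList ((p ++ ['-']).drop i) := by
      unfold pvSl
      rw [List.take_of_length_le (by simp [List.length_drop])]
    simp [hsl]

-- the bucket of the newly appended dash is empty
lemma pvOut_top (p : List Char) :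
    pvOut (p ++ ['-']) p.length = [] := by
  unfold pvOut
  rw [pvDn_snoc, if_pos rfl]
  have hfil : (pvDn p ++ [p.length]).filter (fun j => decide (p.length < j)) = [] := by
    refine List.filter_eq_nil_iff.mpr ?_
    intro j hj
    rw [List.mem_append] at hj
    rcases hj with hj | hj
    · have := (pvDn_mem hj).1
      simp; omega
    · rw [List.mem_singleton] at hj
      subst hj
      simp
  rw [hfil, List.flatMap_nil]

-- the sweep invariant: state after processing p
lemma pvB_inv (p : List Char) :
    p.foldl (fun (st : List (List Char) × List (List String)) c =>
      let acc := st.1.map (fun buf => buf ++ [c])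
      if c = '-' then
        (acc ++ [['-']],
         (List.zipWith (fun buf o => o ++ [String.ofList buf, String.ofList buf]) acc st.2) ++ [[]])
      else
        (acc, st.2)) ([], [])
    = ((pvDn p).map (fun i => p.drop i), (pvDn p).map (pvOut p)) := by
  induction p using List.reverseRecOn with
  | nil => simp [pvDn]
  | append_singleton p c ih =>
    rw [List.foldl_append, ih]
    simp only [List.foldl_cons, List.foldl_nil]
    have hmemle : ∀ i ∈ pvDn p, i ≤ p.length := fun i h => le_of_lt (pvDn_mem h).1
    have hacc : ((pvDn p).map (fun i => p.drop i)).map (fun buf => buf ++ [c])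
        = (pvDn p).map (fun i => (p ++ [c]).drop i) := by
      rw [List.map_map]
      apply List.map_congr_left
      intro i hi
      exact (List.drop_append_of_le_length (hmemle i hi)).symm
    by_cases hc : c = '-'
    · subst hc
      simp only [hacc]
      rw [List.zipWith_map, List.zipWith_self]
      rw [pvDn_snoc, if_pos rfl, List.map_append, List.map_append, if_pos trivial]
      congr 1
      · congr 1
        simp [List.drop_append_of_le_length (le_refl p.length), List.drop_length]
      · congr 1
        · apply List.map_congr_left
          intro i hi
          exact (pvOut_snoc_dash p i hi).symm
        · simp [pvOut_top p]
    · simp only [if_neg hc, hacc]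
      rw [pvDn_snoc, if_neg hc, List.append_nil]
      congr 1
      apply List.map_congr_left
      intro i hi
      exact (pvOut_snoc_ne p c hc i (hmemle i hi)).symm

-- ===== VERDICT (by name: the statement is the Claim_ definition above) =====
theorem tiret_milieu_spec : Claim_equal_tiret_milieu := by
  intro v _
  unfold Spec_tiret_milieu
  rw [pvA_flatMap, pvDints_eq]
  simp only [List.pure_def, List.bind_eq_flatMap, List.map_id', ← List.map_eq_flatMap]
  unfold tiret_milieu_alt
  simp only [pvB_inv]
  rw [PySem.List.foldl_append_eq_flatten, List.nil_append]
  rw [show ((pvDn v.toList).map (pvOut v.toList)).flatten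
        = (pvDn v.toList).flatMap (pvOut v.toList) from List.flatMap_def.symm]
  rw [List.flatMap_map]
  apply List.flatMap_congr
  intro i hi
  unfold pvOut
  rw [List.filter_map]
  rw [show ((fun j : Int => decide ((i : Int) < j)) ∘ (Nat.cast : Nat → Int)) = (fun j : Nat => decide (i < j)) from by funext j; simp]
  rw [List.flatMap_map]
  apply List.flatMap_congr
  intro j hj
  rw [pvSlice_eq]
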